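/- GENERATED by mk_final_copies.py from the proof of the farm's unit `vorbis_decode_packet_rest.5c` (farm:vorbis_decode_packet_rest.5c.1: Lemmas.lean) as the
   re-elaboration sweep compiled it — do not edit. -/
/-
  LEMMAS OF THE UNIT vorbis_decode_packet_rest.5c (cut11 0x1111a6 → the loop head 0x11109c).
    * pure facts (from the head start of an earlier worker): the bit-level forms of the counter and of the two byte indices
      (`nb5c_sx32 nb5c_sx32' nb5c_sxj nb5c_succ`), the frame object `step2_flag` (`nb5c_step2_obj`), the geometry of the block at
      `finalY[i]` (`nb5c_fy_where`), and the ONE lemma that builds the exit assertion (`nb5c_exit`);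
    * the three INNER cut points of the round (`at_1111dd`, `at_11123c`, `at_111098`: joins of the ten paths) and their assertion
      `RoundAt`, stated RELATIVE to the state `v` at the cut 0x1111a6;
    * one walk per stage: `stage1` (0x1111a6 → 0x1111dd, 2 paths, 1 check), `stage2` (0x1111dd → 0x11123c ∨ 0x111098, 2 paths,
      4 checks), `stage3` (0x11123c → 0x111098, 4 paths), `stage4` (0x111098 → 0x11109c, `++j`, the exit `AtNbLoop … i (j + 1)`).
  Proof.lean joins the stages by `ReachVia.trans`.
-/
import Asan.CheckWalk
import Vorbis.Spec.PacketRestFrame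
import Vorbis.Spec.Units.vorbis_decode_packet_rest_5c

open X86 X86.User Asan Vorbis Vorbis.Spec Vorbis.Spec.vorbis_decode_packet_rest

set_option maxRecDepth 40000
set_option maxHeartbeats 4000000

namespace Vorbis.Spec.vorbis_decode_packet_rest_5c

/-- `movsxd r64, dword` of a stored zero-extended byte: the word `b`. -/
theorem nb5c_sx32 (b : Nat) (h : b < 256) :
    Word.ofBV (BitVec.signExtend 64 (BitVec.ofNat 32 (b % 4294967296))) = UInt64.ofNat b := by
  apply UInt64.toNat_inj.mp
  rw [Vorbis.Spec.sext32_toNat, UInt64.toNat_ofNat_of_lt' (by unfold UInt64.size; omega)]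
  simp only [BitVec.toNat_ofNat]
  rw [if_pos (by omega)]
  omega

/-- `movsxd r64, dword` of a stored zero-extended byte, without the `% 2^32`. -/
theorem nb5c_sx32' (b : Nat) (h : b < 256) :
    Word.ofBV (BitVec.signExtend 64 (BitVec.ofNat 32 b)) = UInt64.ofNat b := by
  have := nb5c_sx32 b h
  rw [Nat.mod_eq_of_lt (by omega)] at this
  exact this

/-- `movsxd r64, r13d` of the loop counter `j ≤ 250` is the word `j`. -/
theorem nb5c_sxj (j : Nat) (h : j ≤ 250) :
    Word.ofBV (BitVec.signExtend 64 (Word.part .w32 (UInt64.ofNat j))) = UInt64.ofNat j := by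
  apply UInt64.toNat_inj.mp
  rw [Vorbis.Spec.sext32_toNat, Vorbis.toNat_part32, UInt64.toNat_ofNat_of_lt' (by unfold UInt64.size; omega)]
  rw [if_pos (by omega)]
  omega

/-- `add r13d, 1` of the loop counter `j ≤ 250`: the word `j + 1`. -/
theorem nb5c_succ (j : Nat) (h : j ≤ 250) :
    Word.ofBV (Word.part Width.w32 (UInt64.ofNat j) + 1#32) = UInt64.ofNat (j + 1) := by
  apply UInt64.toNat_inj.mp
  rw [Vorbis.toNat_ofBV32, BitVec.toNat_add, Vorbis.toNat_part32, UInt64.toNat_ofNat_of_lt' (by unfold UInt64.size; omega),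
    UInt64.toNat_ofNat_of_lt' (by unfold UInt64.size; omega)]
  have e1 : (1#32).toNat = 1 := by decide
  rw [e1]
  omega

/-- **The frame object `step2_flag[256]`** (= `do_not_decode`: 256 bytes at `steady rsp + 0x140` = `entry rsp − 2872 + 192`) is an
object of the live set inside the function: the `ho` of `Vorbis.check_small` at the four store1 check sites. -/
theorem nb5c_step2_obj (others : List Obj) (frames : List (Nat × FrameLayout)) (e : State) :
    (⟨(e.reg .rsp).toNat - 2872 + 192, 256, .stack⟩ : Obj) ∈ stackObjs (framesIn frames e) ++ others := by
  apply List.mem_append_left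
  unfold framesIn
  rw [stackObjs_cons]
  apply List.mem_append_left
  unfold FrameLayout.objsAt Vorbis.Frames.vorbis_decode_packet_rest
  simp only [List.map_cons, List.mem_cons, true_or, or_true]

/-- **Where the block at `finalY[c]` lies**: it is a setup block of the arena, of at least 4 bytes, in the data space, off the
stack region (with the arena's 32-byte header between it and `800000H`), and apart from `*f`. -/
theorem nb5c_fy_where {others : List Obj} {frames : List (Nat × FrameLayout)} {len : Nat} {Ar : Arena} {stored room : Int}
    {ysz : Nat → Nat} {mem : Mem} {f c : Nat}
    (h : DecodeInv others frames len Ar stored room ysz mem f) (hc : (c : Int) < stb_vorbis.channels mem f) :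
    4 ≤ ysz c ∧
      0x119d40 ≤ stb_vorbis.finalY mem f c ∧ stb_vorbis.finalY mem f c + ysz c ≤ 0xC00000 ∧
      (stb_vorbis.finalY mem f c + ysz c ≤ 0x700000 ∨ 0x800020 ≤ stb_vorbis.finalY mem f c) ∧
      (stb_vorbis.finalY mem f c + ysz c ≤ f ∨ f + 1808 ≤ stb_vorbis.finalY mem f c) := by
  obtain ⟨hblk, hsz⟩ := h.fy c hc
  have hcfg := h.config
  have hC : SampleBuf (RunBlk Ar len) mem f ⟨stb_vorbis.finalY mem f c, ysz c⟩ := SampleBuf.finalY c hc (ysz c) hblk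
  have h1 := hcfg.floor.toFloorShape.FL1
  have h0 : ((0 : Nat) : Int) < stb_vorbis.floor_count mem f := by omega
  have hv := (hcfg.floor.floor (IsFloor.of_lt h0)).values_bounds
  have hs0 := hsz 0 h0
  have h4 : 4 ≤ ysz c := by omega
  have hd := h.sep.bufobj _ hC
  simp only [vblock, voff] at hd
  have hA := h.arena
  have htext := h.arenaText
  simp only [Vorbis.L.textHi] at htext
  rcases h.buf _ hC with hz | hb
  · simp only [] at hz
    omega
  · have hr := hA.block_range (p := stb_vorbis.finalY mem f c) (n := ysz c) hb
    have hl := le_r8 (ysz c)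
    have a1 := hA.AR1
    have a1x := hA.AR1x
    have a2 := hA.AR2
    refine ⟨h4, ?_, ?_, ?_, ?_⟩ <;> omega

/-- **Every exit of .5c**: a state `s` at the loop head whose memory differs from the one at the cut (`v`) only below the spill
slot `[0x20]` (the return addresses of the check calls, the scratch slots `[0x0] … [0x18]`), in the dword `[0x2c]`, inside
`step2_flag` and inside the block at `finalY[i]`, with `r13 = j + 1` and r15 unchanged, satisfies `AtNbLoop … i (j + 1)`. -/
theorem nb5c_exit {u₀ : State} {others : List Obj} {frames : List (Nat × FrameLayout)} {len : Nat} {Ar : Arena}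
    {stored room : Int} {mode : Nat} {ysz : Nat → Nat} {e : State} {ret : Word} {i j : Nat} {v s : State}
    (hat : AtNbPred u₀ others frames len Ar stored room mode ysz e ret i j v)
    (hrip : s.rip = Vorbis.L.vorbis_decode_packet_rest.cut10)
    (hrsp : s.reg .rsp = e.reg .rsp - 3000) (hcode : Vorbis.CodeOK u₀ s.mem) (habi : abiInv s)
    (hs : Mem.SameExcept [⟨(e.reg .rsp).toNat - 3856, (e.reg .rsp).toNat - 2968⟩,
        ⟨(e.reg .rsp).toNat - 2956, (e.reg .rsp).toNat - 2952⟩,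
        ⟨(e.reg .rsp).toNat - 2680, (e.reg .rsp).toNat - 2424⟩,
        ⟨stb_vorbis.finalY v.mem (fOf e) i, stb_vorbis.finalY v.mem (fOf e) i + ysz i⟩] v.mem s.mem)
    (hun : ShadowUntouched v.mem s.mem)
    (h13 : s.reg .r13 = UInt64.ofNat (j + 1)) (h15 : s.reg .r15 = v.reg .r15) :
    AtNbLoop u₀ others frames len Ar stored room mode ysz e ret i (j + 1) s := by
  have hR1 : 0x700000 + 3856 ≤ (e.reg .rsp).toNat := hat.entry.room
  have hR2 : (e.reg .rsp).toNat + 8 ≤ 0x800000 := hat.entry.top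
  -- the four windows lie inside the three of `nbWins`
  have hs' : Mem.SameExcept (nbWins ysz e v.mem i) v.mem s.mem := by
    apply hs.mono
    intro w hw a h1 h2
    simp only [List.mem_cons, List.mem_nil_iff, or_false] at hw
    unfold nbWins
    rcases hw with rfl | rfl | rfl | rfl
    · exact ⟨_, List.mem_cons_self, by simp only [] at h1 h2 ⊢; omega⟩
    · exact ⟨_, List.mem_cons_self, by simp only [] at h1 h2 ⊢; omega⟩
    · exact ⟨_, List.mem_cons_of_mem _ List.mem_cons_self, by simp only [] at h1 h2 ⊢; omega⟩
    · exact ⟨_, List.mem_cons_of_mem _ (List.mem_cons_of_mem _ List.mem_cons_self), by simp only [] at h1 h2 ⊢; omega⟩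
  obtain ⟨hst, hi', hg', hval, efy, emap⟩ := Stable.nb_carry hat.toStable hat.i_lt hat.g hrsp hcode habi hs' hun
  -- the three spill slots are off the four windows
  obtain ⟨_, _, _, hfyoff, _⟩ := nb5c_fy_where hat.inv hat.i_lt
  have rd : ∀ (k n : Nat), 0x20 ≤ k → k + n ≤ 0x3c → (k + n ≤ 0x2c ∨ 0x30 ≤ k) →
      s.mem.readLE (e.reg .rsp - 3000 + UInt64.ofNat k) n = v.mem.readLE (e.reg .rsp - 3000 + UInt64.ofNat k) n := by
    intro k n h1 h2 h3
    have ea := toNat_slot (e.reg .rsp) k (by omega) hR1 hR2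
    apply hs.readLE _ n (by omega)
    intro w hw
    simp only [List.mem_cons, List.mem_nil_iff, or_false] at hw
    rcases hw with rfl | rfl | rfl | rfl <;> simp only [] <;> omega
  have hfl := (hat.inv.config.floor.floor hat.g).values_bounds
  have hjlt := hat.j_lt
  refine { toStable := hst, rip := hrip, g := ?_, r13 := h13, j_ge := by have := hat.j_ge; omega, j_le := ?_, slot_i := ?_,
           i_lt := hi', slot_finalY := ?_, slot_map := ?_ }
  · rw [h15]
    exact hg'
  · rw [h15, hval]
    omega
  · show s.mem.readLE (e.reg .rsp - 3000 + 0x38) 4 = i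
    rw [← hat.slot_i]
    exact rd 0x38 4 (by omega) (by omega) (by omega)
  · show s.mem.readLE (e.reg .rsp - 3000 + 0x20) 8 = _
    rw [efy, ← hat.slot_finalY]
    exact rd 0x20 8 (by omega) (by omega) (by omega)
  · show s.mem.readLE (e.reg .rsp - 3000 + 0x30) 8 = _
    rw [emap, ← hat.slot_map]
    exact rd 0x30 8 (by omega) (by omega) (by omega)

/-- 0x1111dd `test r12d, r12d` (line 3279 `if (val)`): the join of the two arms of `if (highroom < lowroom)`. -/
abbrev at_1111dd : Word := 0x1111dd

/-- 0x11123c `cmp DWORD PTR [rsp+0x10], r12d` (line 3282 `if (val >= room)`): after the three stores into `step2_flag`. -/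
abbrev at_11123c : Word := 0x11123c

/-- 0x111098 `add r13d, 1` (line 3266 `++j`): the join of every path of the round. -/
abbrev at_111098 : Word := 0x111098

/-- **The assertion at the inner cut points of the round** (`pc` = 0x1111dd, 0x11123c, 0x111098), RELATIVE to the state `v` at the
cut 0x1111a6 (`AtNbPred`): the steady stack pointer, the text, DF / MXCSR, the memory differs from `v`'s only in four literal
windows (below the spill slot `[0x20]`, the dword `[0x2c]`, `step2_flag`, the block `[fy, fy + n)` at `finalY[i]`) and not in the
shadow, `r13 = j`, `r14 = &finalY[j]`, r15 as at the cut. -/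
structure RoundAt (u₀ e v : State) (fy n j : Nat) (pc : Word) (s : State) : Prop where
  /-- the cut point -/
  rip : s.rip = pc
  /-- the steady stack pointer -/
  rsp : s.reg .rsp = e.reg .rsp - 3000
  /-- the text is unchanged -/
  code : Vorbis.CodeOK u₀ s.mem
  /-- DF = 0, the MXCSR masks -/
  abi : abiInv s
  /-- what was written since the cut 0x1111a6 -/
  same : Mem.SameExcept [⟨(e.reg .rsp).toNat - 3856, (e.reg .rsp).toNat - 2968⟩,
      ⟨(e.reg .rsp).toNat - 2956, (e.reg .rsp).toNat - 2952⟩,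
      ⟨(e.reg .rsp).toNat - 2680, (e.reg .rsp).toNat - 2424⟩,
      ⟨fy, fy + n⟩] v.mem s.mem
  /-- no shadow byte was written since the cut 0x1111a6 -/
  untouched : ShadowUntouched v.mem s.mem
  /-- the counter -/
  r13 : s.reg .r13 = UInt64.ofNat j
  /-- `&finalY[j]` (0x1111ad `add r14, rcx`) -/
  r14 : s.reg .r14 = UInt64.ofNat (2 * j) + UInt64.ofNat fy
  /-- `g` -/
  r15 : s.reg .r15 = v.reg .r15

/-- **Stage 1, 0x1111a6 → 0x1111dd** (lines 3271–3278). -/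
theorem stage1 {Lay : Layout} (hLay : Lay.hi = 0x1000000) {μ : Microarch} (hμ : UserX.MicroOK μ) {u₀ : State}
    (hcode : HasCodeNat Lay u₀ Vorbis.L.vorbis_decode_packet_rest.entry Vorbis.Code.code_vorbis_decode_packet_rest.nat Vorbis.L.vorbis_decode_packet_rest.size)
    (hload2 : Asan.SmallCheck Lay μ Vorbis.WayInv (Vorbis.CodeOK u₀) [.rax, .rcx, .rdx] 2 Vorbis.L.__asan_load2_noabort.entry)
    {others : List Obj} {frames : List (Nat × FrameLayout)} {len : Nat} {Ar : Arena} {stored room : Int}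
    {mode : Nat} {ysz : Nat → Nat} {e : State} {ret : Word} {i j : Nat} {v : State}
    (hat : AtNbPred u₀ others frames len Ar stored room mode ysz e ret i j v)
    {fy lo hi : Nat} (hfy : stb_vorbis.finalY v.mem (fOf e) i = fy)
    (slo : v.mem.readLE (e.reg .rsp - 3000) 4 = lo) (shi : v.mem.readLE (e.reg .rsp - 2992) 4 = hi) :
    ReachVia Lay μ Vorbis.WayInv v (fun a => RoundAt u₀ e v fy (ysz i) j at_1111dd a ∧
      a.mem.readLE (e.reg .rsp - 3000) 4 = lo ∧ a.mem.readLE (e.reg .rsp - 2992) 4 = hi) := by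
  -- 1. the ENTRY state's facts
  have he := hat.entry
  v_entry he
  -- 2. the present state
  have w_rip := hat.rip
  have c_rsp : v.reg .rsp = e.reg .rsp - 3000 := hat.rsp
  have c_r13 : v.reg .r13 = UInt64.ofNat j := hat.r13
  have c_r14 : v.reg .r14 = UInt64.ofNat (2 * j) := hat.r14
  have w_eq : Mem.EqOn Vorbis.L.textLo Vorbis.L.textHi u₀.mem v.mem := hat.code
  have hdf : v.flags .df = false := (show abiInv _ from hat.abi).1
  have hmx : v.mxcsr &&& 0x1F80 = 0x1F80 := (show abiInv _ from hat.abi).2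
  have hsse := Vorbis.sseOK_of_abiInv hat.abi
  -- the block at `finalY[i]`, `values`
  obtain ⟨h4, hfy1, hfy2, hfy3, _⟩ := nb5c_fy_where hat.inv hat.i_lt
  rw [hfy] at hfy1 hfy2 hfy3
  have hvb := (hat.inv.config.floor.floor hat.g).values_bounds
  have hjlt := hat.j_lt
  have hj2 := hat.j_ge
  have hj250 : j < 250 := by omega
  obtain ⟨idx, hidx, hgeq⟩ := hat.g
  have hysz := (hat.inv.fy i hat.i_lt).2 idx hidx
  rw [← hgeq] at hysz
  have hjy : 2 * j + 2 ≤ ysz i := by omega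
  -- where `*f` lies
  obtain ⟨hf1, hf2⟩ : 0x400000 ≤ (e.reg .rdi).toNat ∧ (e.reg .rdi).toNat + 1808 ≤ 0xC00000 := by
    have hr := hat.inv.fb.vorbis.bits.OBR
    simp only [voff] at hr
    exact hr
  -- 3. the stack slots the segment loads
  have sfy : v.mem.readLE (e.reg .rsp - 2968) 8 = fy := by
    have := hat.slot_finalY
    simp only [slot64, spOf, addr_norm] at this
    rw [hfy] at this
    exact this
  obtain ⟨pr, c_rax⟩ : ∃ pr : Word, v.reg .rax = pr := ⟨_, rfl⟩
  obtain ⟨rg, srg⟩ : ∃ rg : Nat, v.mem.readLE (e.reg .rsp - 2924) 4 = rg := ⟨_, rfl⟩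
  -- 4. the walk, to the return of the check of `finalY[j]`
  u_walk hcode [hμ.vendor] until [Vorbis.L.vorbis_decode_packet_rest.ret49] span [Vorbis.L.textLo, Vorbis.L.textHi] side (v_side)
  · -- 0x1111b3: the check of `finalY[j]`
    have hun : ShadowUntouched v.mem s_1111b3.mem := by v_untouched
    have hblk := (hat.inv.fy i hat.i_lt).1
    rw [hfy] at hblk
    have hsite : Site (LiveSet others (framesIn frames e)) (fy + 2 * j) 2 :=
      Site.of_blk hat.inv.live hblk (by simp only []; omega) (by simp only []; omega) (by omega)
    exact Vorbis.Spec.check_site hat.shadow hun hsite (by u_omega)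
  u_walk hcode [hμ.vendor] until [at_1111dd] span [Vorbis.L.textLo, Vorbis.L.textHi] side (v_side)
  · -- the arm `highroom ≥ lowroom` (0x11104c: `room = lowroom * 2`) → 0x1111dd
    refine ReachVia.done ⟨?_, ?_, ?_⟩
    · refine { rip := w_rip, rsp := w_rsp, code := w_eq, abi := ?_, same := ?_, untouched := ?_, r13 := ?_, r14 := w_r14,
               r15 := w_kept .r15 rfl }
      · v_inv
      · u_same
      · v_untouched
      · rw [w_kept .r13 rfl]
        exact c_r13
    · u_resolve
    · u_resolve
  · -- the arm `highroom < lowroom` (0x1111d7: `room = highroom * 2`) → 0x1111dd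
    refine ReachVia.done ⟨?_, ?_, ?_⟩
    · refine { rip := w_rip, rsp := w_rsp, code := w_eq, abi := ?_, same := ?_, untouched := ?_, r13 := ?_, r14 := w_r14,
               r15 := w_kept .r15 rfl }
      · v_inv
      · u_same
      · v_untouched
      · rw [w_kept .r13 rfl]
        exact c_r13
    · u_resolve
    · u_resolve

/-- **Stage 2, 0x1111dd → 0x11123c ∨ 0x111098** (lines 3279–3281, 3293–3294). -/
theorem stage2 {Lay : Layout} (hLay : Lay.hi = 0x1000000) {μ : Microarch} (hμ : UserX.MicroOK μ) {u₀ : State}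
    (hcode : HasCodeNat Lay u₀ Vorbis.L.vorbis_decode_packet_rest.entry Vorbis.Code.code_vorbis_decode_packet_rest.nat Vorbis.L.vorbis_decode_packet_rest.size)
    (hstore1 : Asan.SmallCheck Lay μ Vorbis.WayInv (Vorbis.CodeOK u₀) [.rax, .rdx] 1 Vorbis.L.__asan_store1_noabort.entry)
    {others : List Obj} {frames : List (Nat × FrameLayout)} {len : Nat} {Ar : Arena} {stored room : Int}
    {mode : Nat} {ysz : Nat → Nat} {e : State} {ret : Word} {i j : Nat} {v : State}
    (hat : AtNbPred u₀ others frames len Ar stored room mode ysz e ret i j v)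
    {fy lo hi : Nat} (hfy : stb_vorbis.finalY v.mem (fOf e) i = fy) (hlo : lo < 256) (hhi : hi < 256)
    {a : State} (hm : RoundAt u₀ e v fy (ysz i) j at_1111dd a)
    (sla : a.mem.readLE (e.reg .rsp - 3000) 4 = lo) (sha : a.mem.readLE (e.reg .rsp - 2992) 4 = hi) :
    ReachVia Lay μ Vorbis.WayInv a (fun b => RoundAt u₀ e v fy (ysz i) j at_11123c b ∨
      RoundAt u₀ e v fy (ysz i) j at_111098 b) := by
  -- 1. the ENTRY state's facts
  have he := hat.entry
  v_entry he
  -- 2. the present state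
  have w_rip := hm.rip
  have c_rsp : a.reg .rsp = e.reg .rsp - 3000 := hm.rsp
  have c_r13 : a.reg .r13 = UInt64.ofNat j := hm.r13
  have c_r14 : a.reg .r14 = UInt64.ofNat (2 * j) + UInt64.ofNat fy := hm.r14
  have w_eq : Mem.EqOn Vorbis.L.textLo Vorbis.L.textHi u₀.mem a.mem := hm.code
  have hdf : a.flags .df = false := (show abiInv _ from hm.abi).1
  have hmx : a.mxcsr &&& 0x1F80 = 0x1F80 := (show abiInv _ from hm.abi).2
  have hsse := Vorbis.sseOK_of_abiInv hm.abi
  have hsame0 := hm.same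
  have hun0 := hm.untouched
  obtain ⟨val, c_r12⟩ : ∃ w : Word, a.reg .r12 = w := ⟨_, rfl⟩
  obtain ⟨pr, c_rbx⟩ : ∃ w : Word, a.reg .rbx = w := ⟨_, rfl⟩
  -- the block at `finalY[i]`, `values`
  obtain ⟨h4, hfy1, hfy2, hfy3, _⟩ := nb5c_fy_where hat.inv hat.i_lt
  rw [hfy] at hfy1 hfy2 hfy3
  have hvb := (hat.inv.config.floor.floor hat.g).values_bounds
  have hjlt := hat.j_lt
  have hj2 := hat.j_ge
  have hj250 : j < 250 := by omega
  obtain ⟨idx, hidx, hgeq⟩ := hat.g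
  have hysz := (hat.inv.fy i hat.i_lt).2 idx hidx
  rw [← hgeq] at hysz
  have hjy : 2 * j + 2 ≤ ysz i := by omega
  have ho := nb5c_step2_obj others frames e
  have e_sxj := nb5c_sxj j (by omega)
  have e_lo := nb5c_sx32 lo hlo
  have e_hi := nb5c_sx32 hi hhi
  have e_lo' := nb5c_sx32' lo hlo
  have e_hi' := nb5c_sx32' hi hhi
  -- 3. the walk
  u_walk hcode [hμ.vendor, e_sxj, e_lo, e_hi, e_lo', e_hi'] until [at_11123c, at_111098] span [Vorbis.L.textLo, Vorbis.L.textHi] side (v_side)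
  · -- 0x111087: the check of `step2_flag[j]`, a byte of the own frame object
    have hun1 : ShadowUntouched a.mem s_111087.mem := by v_untouched
    have hun : ShadowUntouched v.mem s_111087.mem := Mem.EqOn.trans hun0 hun1
    exact Vorbis.check_small hat.shadow hun ho (by decide) (by simp only []; u_omega) (by simp only []; u_omega)
  · -- 0x1111fc: the check of `step2_flag[high]`, a byte of the own frame object
    have hun1 : ShadowUntouched a.mem s_1111fc.mem := by v_untouched
    have hun : ShadowUntouched v.mem s_1111fc.mem := Mem.EqOn.trans hun0 hun1
    exact Vorbis.check_small hat.shadow hun ho (by decide) (by simp only []; u_omega) (by simp only []; u_omega)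
  · -- 0x111216: the check of `step2_flag[low]`, a byte of the own frame object
    have hun1 : ShadowUntouched a.mem s_111216.mem := by v_untouched
    have hun : ShadowUntouched v.mem s_111216.mem := Mem.EqOn.trans hun0 hun1
    exact Vorbis.check_small hat.shadow hun ho (by decide) (by simp only []; u_omega) (by simp only []; u_omega)
  · -- 0x11122f: the check of `step2_flag[j]`, a byte of the own frame object
    have hun1 : ShadowUntouched a.mem s_11122f.mem := by v_untouched
    have hun : ShadowUntouched v.mem s_11122f.mem := Mem.EqOn.trans hun0 hun1
    exact Vorbis.check_small hat.shadow hun ho (by decide) (by simp only []; u_omega) (by simp only []; u_omega)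
  · -- `val = 0`: `step2_flag[j] = 0`, `finalY[j] = pred` → 0x111098
    refine ReachVia.done (Or.inr ?_)
    refine { rip := w_rip, rsp := w_rsp, code := w_eq, abi := ?_, same := ?_, untouched := ?_, r13 := ?_, r14 := ?_,
             r15 := ?_ }
    · v_inv
    · u_same
    · have hun1 : ShadowUntouched a.mem s_111094.mem := by v_untouched
      exact Mem.EqOn.trans hun0 hun1
    · rw [w_kept .r13 rfl]
      exact c_r13
    · rw [w_kept .r14 rfl]
      exact c_r14
    · rw [w_kept .r15 rfl]
      exact hm.r15
  · -- `val ≠ 0`: the three stores into `step2_flag` → 0x11123c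
    refine ReachVia.done (Or.inl ?_)
    refine { rip := w_rip, rsp := w_rsp, code := w_eq, abi := ?_, same := ?_, untouched := ?_, r13 := ?_, r14 := ?_,
             r15 := ?_ }
    · v_inv
    · u_same
    · have hun1 : ShadowUntouched a.mem s_111234.mem := by v_untouched
      exact Mem.EqOn.trans hun0 hun1
    · rw [w_kept .r13 rfl]
      exact c_r13
    · rw [w_kept .r14 rfl]
      exact c_r14
    · rw [w_kept .r15 rfl]
      exact hm.r15

/-- **Stage 3, 0x11123c → 0x111098** (lines 3282–3291): the four ways `finalY[j]` is (or is not) rewritten. -/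
theorem stage3 {Lay : Layout} (hLay : Lay.hi = 0x1000000) {μ : Microarch} (hμ : UserX.MicroOK μ) {u₀ : State}
    (hcode : HasCodeNat Lay u₀ Vorbis.L.vorbis_decode_packet_rest.entry Vorbis.Code.code_vorbis_decode_packet_rest.nat Vorbis.L.vorbis_decode_packet_rest.size)
    {others : List Obj} {frames : List (Nat × FrameLayout)} {len : Nat} {Ar : Arena} {stored room : Int}
    {mode : Nat} {ysz : Nat → Nat} {e : State} {ret : Word} {i j : Nat} {v : State}
    (hat : AtNbPred u₀ others frames len Ar stored room mode ysz e ret i j v)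
    {fy : Nat} (hfy : stb_vorbis.finalY v.mem (fOf e) i = fy)
    {b : State} (hm : RoundAt u₀ e v fy (ysz i) j at_11123c b) :
    ReachVia Lay μ Vorbis.WayInv b (fun t => RoundAt u₀ e v fy (ysz i) j at_111098 t) := by
  -- 1. the ENTRY state's facts
  have he := hat.entry
  v_entry he
  -- 2. the present state
  have w_rip := hm.rip
  have c_rsp : b.reg .rsp = e.reg .rsp - 3000 := hm.rsp
  have c_r13 : b.reg .r13 = UInt64.ofNat j := hm.r13
  have c_r14 : b.reg .r14 = UInt64.ofNat (2 * j) + UInt64.ofNat fy := hm.r14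
  have w_eq : Mem.EqOn Vorbis.L.textLo Vorbis.L.textHi u₀.mem b.mem := hm.code
  have hdf : b.flags .df = false := (show abiInv _ from hm.abi).1
  have hmx : b.mxcsr &&& 0x1F80 = 0x1F80 := (show abiInv _ from hm.abi).2
  have hsse := Vorbis.sseOK_of_abiInv hm.abi
  have hsame0 := hm.same
  have hun0 := hm.untouched
  obtain ⟨val, c_r12⟩ : ∃ w : Word, b.reg .r12 = w := ⟨_, rfl⟩
  obtain ⟨pr, c_rbx⟩ : ∃ w : Word, b.reg .rbx = w := ⟨_, rfl⟩
  -- the block at `finalY[i]`, `values`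
  obtain ⟨h4, hfy1, hfy2, hfy3, _⟩ := nb5c_fy_where hat.inv hat.i_lt
  rw [hfy] at hfy1 hfy2 hfy3
  have hvb := (hat.inv.config.floor.floor hat.g).values_bounds
  have hjlt := hat.j_lt
  have hj2 := hat.j_ge
  have hj250 : j < 250 := by omega
  obtain ⟨idx, hidx, hgeq⟩ := hat.g
  have hysz := (hat.inv.fy i hat.i_lt).2 idx hidx
  rw [← hgeq] at hysz
  have hjy : 2 * j + 2 ≤ ysz i := by omega
  -- 3. the walk
  u_walk hcode [hμ.vendor] until [at_111098] span [Vorbis.L.textLo, Vorbis.L.textHi] side (v_side)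
  · -- `val < room`, `val` even (0x11106f): `finalY[j] = pred + (val >> 1)` → 0x111098
    refine ReachVia.done ?_
    refine { rip := w_rip, rsp := ?_, code := w_eq, abi := ?_, same := ?_, untouched := ?_, r13 := ?_, r14 := ?_,
             r15 := ?_ }
    · rw [w_kept .rsp rfl]
      exact c_rsp
    · v_inv
    · u_same
    · have hun1 : ShadowUntouched b.mem s_11107a.mem := by v_untouched
      exact Mem.EqOn.trans hun0 hun1
    · rw [w_kept .r13 rfl]
      exact c_r13
    · rw [w_kept .r14 rfl]
      exact c_r14
    · rw [w_kept .r15 rfl]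
      exact hm.r15
  · -- `val < room`, `val` odd (0x11105f): `finalY[j] = pred - ((val + 1) >> 1)` → 0x111098
    refine ReachVia.done ?_
    refine { rip := w_rip, rsp := ?_, code := w_eq, abi := ?_, same := ?_, untouched := ?_, r13 := ?_, r14 := ?_,
             r15 := ?_ }
    · rw [w_kept .rsp rfl]
      exact c_rsp
    · v_inv
    · u_same
    · have hun1 : ShadowUntouched b.mem s_11106d.mem := by v_untouched
      exact Mem.EqOn.trans hun0 hun1
    · rw [w_kept .r13 rfl]
      exact c_r13
    · rw [w_kept .r14 rfl]
      exact c_r14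
    · rw [w_kept .r15 rfl]
      exact hm.r15
  · -- `val ≥ room`, `highroom > lowroom` (0x11124d taken): `finalY[j]` is left as it is → 0x111098
    refine ReachVia.done ?_
    refine { rip := w_rip, rsp := ?_, code := w_eq, abi := ?_, same := ?_, untouched := ?_, r13 := ?_, r14 := ?_,
             r15 := ?_ }
    · rw [w_kept .rsp rfl]
      exact c_rsp
    · v_inv
    · u_same
    · have hun1 : ShadowUntouched b.mem s_11124d.mem := by v_untouched
      exact Mem.EqOn.trans hun0 hun1
    · rw [w_kept .r13 rfl]
      exact c_r13
    · rw [w_kept .r14 rfl]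
      exact c_r14
    · rw [w_kept .r15 rfl]
      exact hm.r15
  · -- `val ≥ room`, `highroom ≤ lowroom` (0x111253): `finalY[j] = pred - val + highroom - 1` → 0x111098
    refine ReachVia.done ?_
    refine { rip := w_rip, rsp := ?_, code := w_eq, abi := ?_, same := ?_, untouched := ?_, r13 := ?_, r14 := ?_,
             r15 := ?_ }
    · rw [w_kept .rsp rfl]
      exact c_rsp
    · v_inv
    · u_same
    · have hun1 : ShadowUntouched b.mem s_111260.mem := by v_untouched
      exact Mem.EqOn.trans hun0 hun1
    · rw [w_kept .r13 rfl]
      exact c_r13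
    · rw [w_kept .r14 rfl]
      exact c_r14
    · rw [w_kept .r15 rfl]
      exact hm.r15

/-- **Stage 4, 0x111098 → 0x11109c** (line 3266 `++j`): the one instruction `add r13d, 1`, and the exit assertion
`AtNbLoop … i (j + 1)` by `nb5c_exit`. -/
theorem stage4 {Lay : Layout} (hLay : Lay.hi = 0x1000000) {μ : Microarch} {u₀ : State}
    (hcode : HasCodeNat Lay u₀ Vorbis.L.vorbis_decode_packet_rest.entry Vorbis.Code.code_vorbis_decode_packet_rest.nat Vorbis.L.vorbis_decode_packet_rest.size)
    {others : List Obj} {frames : List (Nat × FrameLayout)} {len : Nat} {Ar : Arena} {stored room : Int}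
    {mode : Nat} {ysz : Nat → Nat} {e : State} {ret : Word} {i j : Nat} {v : State}
    (hat : AtNbPred u₀ others frames len Ar stored room mode ysz e ret i j v)
    {fy : Nat} (hfy : stb_vorbis.finalY v.mem (fOf e) i = fy)
    {t : State} (hm : RoundAt u₀ e v fy (ysz i) j at_111098 t) :
    ReachVia Lay μ Vorbis.WayInv t (fun w => AtNbLoop u₀ others frames len Ar stored room mode ysz e ret i (j + 1) w) := by
  -- 1. the ENTRY state's facts
  have he := hat.entry
  v_entry he
  -- 2. the present state
  have w_rip := hm.rip
  have c_rsp : t.reg .rsp = e.reg .rsp - 3000 := hm.rsp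
  have c_r13 : t.reg .r13 = UInt64.ofNat j := hm.r13
  have w_eq : Mem.EqOn Vorbis.L.textLo Vorbis.L.textHi u₀.mem t.mem := hm.code
  have hdf : t.flags .df = false := (show abiInv _ from hm.abi).1
  have hmx : t.mxcsr &&& 0x1F80 = 0x1F80 := (show abiInv _ from hm.abi).2
  have hsse := Vorbis.sseOK_of_abiInv hm.abi
  have hvb := (hat.inv.config.floor.floor hat.g).values_bounds
  have hjlt := hat.j_lt
  have hj250 : j < 250 := by omega
  -- 3. the walk: one instruction
  u_walk hcode [] until [Vorbis.L.vorbis_decode_packet_rest.cut10] span [Vorbis.L.textLo, Vorbis.L.textHi] side (v_side)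
  -- 4. the exit at the loop head
  refine ReachVia.done ?_
  have hsame : Mem.SameExcept [⟨(e.reg .rsp).toNat - 3856, (e.reg .rsp).toNat - 2968⟩,
      ⟨(e.reg .rsp).toNat - 2956, (e.reg .rsp).toNat - 2952⟩,
      ⟨(e.reg .rsp).toNat - 2680, (e.reg .rsp).toNat - 2424⟩,
      ⟨stb_vorbis.finalY v.mem (fOf e) i, stb_vorbis.finalY v.mem (fOf e) i + ysz i⟩] v.mem s_111098.mem := by
    rw [w_mem, hfy]
    exact hm.same
  have hun : ShadowUntouched v.mem s_111098.mem := by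
    rw [w_mem]
    exact hm.untouched
  have h13 : s_111098.reg .r13 = UInt64.ofNat (j + 1) := by
    rw [w_r13]
    exact nb5c_succ j (by omega)
  have h15 : s_111098.reg .r15 = v.reg .r15 := by
    rw [w_kept .r15 rfl]
    exact hm.r15
  have hrsp : s_111098.reg .rsp = e.reg .rsp - 3000 := by
    rw [w_kept .rsp rfl]
    exact c_rsp
  exact nb5c_exit hat w_rip hrsp w_eq (by v_inv) hsame hun h13 h15

end Vorbis.Spec.vorbis_decode_packet_rest_5c
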